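-- pv_equiv track=rewrite | github.com/holycrap872/ucls-ml-ai | CourseMaterial/03_list_sets_maps/09_markov_chains/sentence_markov.py | create_markov_graph
-- ===== SOURCE A (Python) =====
-- def create_markov_graph(sentence: str) -> dict[str, set[str]]:
--     markov_dict: dict[str, set[str]] = {}
--
--     cur_char = "^"
--     for next_char in sentence:
--         if cur_char not in markov_dict:
--             markov_dict[cur_char] = set()
--
--         markov_dict[cur_char].add(next_char)
--         cur_char = next_char
--
--     if cur_char not in markov_dict:
--         markov_dict[cur_char] = set()
--     markov_dict[cur_char].add("$")
--
--     return markov_dict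
-- ===== SOURCE B (Python) =====
-- def create_markov_graph(sentence: str) -> dict[str, set[str]]:
--     chars = "^" + sentence + "$"
--     pairs = list(zip(chars, chars[1:]))
--     graph: dict[str, set[str]] = {}
--     for a, _ in pairs:
--         if a not in graph:
--             graph[a] = {b for x, b in pairs if x == a}
--     return graph
-- ===== Notes on version B (the rewrite author's own statement) =====
-- stated objective: alternative
-- what changed: B replaces A's single pass with a running cur_char and incrementally grown sets by a staged group-by: it materialises the transition-pair list once, then for each not-yet-seen source key performs a full scan of the pairs collecting that key's entire successor set in one comprehension.
import Mathlib
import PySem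

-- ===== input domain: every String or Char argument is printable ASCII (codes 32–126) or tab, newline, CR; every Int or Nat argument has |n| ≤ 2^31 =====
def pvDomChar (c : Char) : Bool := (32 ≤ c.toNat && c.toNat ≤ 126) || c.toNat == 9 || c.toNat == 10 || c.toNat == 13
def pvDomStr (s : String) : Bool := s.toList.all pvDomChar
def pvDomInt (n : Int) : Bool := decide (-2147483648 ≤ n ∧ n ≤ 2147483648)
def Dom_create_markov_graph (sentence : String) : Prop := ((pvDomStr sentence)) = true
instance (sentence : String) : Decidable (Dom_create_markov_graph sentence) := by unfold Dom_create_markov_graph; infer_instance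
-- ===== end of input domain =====

-- B replaces A's single pass with running cur_char state by a staged group-by:
-- build the transition-pair list once, then for each new source key scan all pairs,
-- collecting its whole successor set at once (alternative decomposition, same results).

-- ===== PORT A =====
-- one iteration of A's loop body: the not-in guard inserting an empty set, then d[cur].add(next)
def mgA_step (st : PySem.Dict String (PySem.Set String) × String) (next : String) :
    PySem.Dict String (PySem.Set String) × String :=
  let d := if st.1.contains st.2 then st.1 else st.1.insert st.2 PySem.Set.empty
  (d.modify st.2 PySem.Set.empty (fun s => PySem.Set.add s next), next)

def create_markov_graph (sentence : String) : List (String × List String) :=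
  let st := sentence.toList.foldl (fun st c => mgA_step st (String.mk [c]))
      ((PySem.Dict.empty : PySem.Dict String (PySem.Set String)), "^")
  (mgA_step st "$").1.items

-- ===== PORT B =====
-- {b for x, b in pairs if x == a} : the set comprehension, built in pair order
def mgB_succs (pairs : List (String × String)) (a : String) : PySem.Set String :=
  pairs.foldl (fun s q => if q.1 == a then PySem.Set.add s q.2 else s) PySem.Set.empty

def create_markov_graph_alt (sentence : String) : List (String × List String) :=
  let chars : List String :=
    ("^".toList ++ sentence.toList ++ "$".toList).map (fun c => String.mk [c])
  let pairs := chars.zip chars.tail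
  (pairs.foldl (fun g p =>
      if g.contains p.1 then g else g.insert p.1 (mgB_succs pairs p.1))
    (PySem.Dict.empty : PySem.Dict String (PySem.Set String))).items

-- ===== PRECONDITION & SPEC =====
def Spec_create_markov_graph (sentence : String) (out : List (String × List String)) : Prop := out = create_markov_graph_alt sentence
instance (sentence : String) (out : List (String × List String)) : Decidable (Spec_create_markov_graph sentence out) := by unfold Spec_create_markov_graph; infer_instance

-- ===== CLAIM (what is proved, stated in full; the proofs are below) =====
def Claim_equal_create_markov_graph : Prop := ∀ (sentence : String), Dom_create_markov_graph sentence → Spec_create_markov_graph sentence (create_markov_graph sentence)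

-- ===== LEMMAS AND PROOFS =====

-- the direct modify-step A's guarded step amounts to
def mgM_step (d : PySem.Dict String (PySem.Set String)) (p : String × String) :
    PySem.Dict String (PySem.Set String) :=
  d.modify p.1 PySem.Set.empty (fun s => PySem.Set.add s p.2)

-- A's guarded step (insert-empty-if-absent, then d[cur].add) is a single modify.
theorem mgA_step_eq (d : PySem.Dict String (PySem.Set String)) (a b : String) :
    mgA_step (d, a) b = (mgM_step d (a, b), b) := by
  unfold mgA_step mgM_step
  by_cases h : d.contains a = true
  · simp [h]
  · simp only [Bool.not_eq_true] at h
    simp only [h, Bool.false_eq_true, if_false]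
    congr 1
    have hgd : d.getD a PySem.Set.empty = PySem.Set.empty := by
      simp [PySem.Dict.getD, (PySem.Dict.get?_eq_none_iff_contains d a).mpr h]
    show (d.insert a PySem.Set.empty).insert a
        (PySem.Set.add ((d.insert a PySem.Set.empty).getD a PySem.Set.empty) b)
      = d.insert a (PySem.Set.add (d.getD a PySem.Set.empty) b)
    rw [PySem.Dict.getD_insert_self, PySem.Dict.insert_insert_self, hgd]

-- A's loop as a fold of mgM_step over the pair list
theorem mgA_fold (L : List Char) (d : PySem.Dict String (PySem.Set String)) (cur : String) :
    (mgA_step (L.foldl (fun st c => mgA_step st (String.mk [c])) (d, cur)) "$").1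
      = ((cur :: (L.map (fun c => String.mk [c]) ++ ["$"])).zip
          (L.map (fun c => String.mk [c]) ++ ["$"])).foldl mgM_step d := by
  induction L generalizing d cur with
  | nil => simp [List.zip, mgA_step_eq]
  | cons c L ih =>
      simp only [List.map_cons, List.cons_append, List.zip_cons_cons, List.foldl_cons,
        mgA_step_eq]
      exact ih _ _

-- getD of the modify-fold is the per-key successor fold
theorem mgM_getD (ps : List (String × String)) (d : PySem.Dict String (PySem.Set String))
    (c : String) :
    (ps.foldl mgM_step d).getD c PySem.Set.empty
      = ps.foldl (fun s q => if q.1 == c then PySem.Set.add s q.2 else s)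
          (d.getD c PySem.Set.empty) := by
  induction ps generalizing d with
  | nil => rfl
  | cons p ps ih =>
      simp only [List.foldl_cons, ih, mgM_step, PySem.Dict.getD_modify]
      by_cases h : c = p.1
      · simp [h]
      · simp [h, Ne.symm h]

-- a dict with Nodup keys is its keys paired with their getD values
theorem items_eq_keys_map (d : PySem.Dict String (PySem.Set String))
    (h : d.keys.Nodup) :
    d.items = d.keys.map (fun k => (k, d.getD k PySem.Set.empty)) := by
  have : d.items.map (fun p => (p.1, d.getD p.1 PySem.Set.empty)) = d.items.map id := by
    apply List.map_congr_left
    intro p hp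
    have hv : d.getD p.1 ([] : PySem.Set String) = p.2 :=
      PySem.Dict.getD_of_mem_items (d := d) (k := p.1) (v := p.2)
        (d0 := PySem.Set.empty) (by simpa using hp) h
    show (p.1, d.getD p.1 ([] : PySem.Set String)) = p
    rw [hv]
  calc d.items = d.items.map id := by simp
    _ = d.items.map (fun p => (p.1, d.getD p.1 PySem.Set.empty)) := this.symm
    _ = d.keys.map (fun k => (k, d.getD k PySem.Set.empty)) := by
        simp [PySem.Dict.keys, List.map_map, Function.comp]

-- B's guarded-insert fold, items characterisation
theorem mgB_fold_items (F : String → PySem.Set String) (l : List (String × String))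
    (g : PySem.Dict String (PySem.Set String)) :
    (l.foldl (fun g p => if g.contains p.1 then g else g.insert p.1 (F p.1)) g).items
      = g.items ++ ((PySem.Set.ofList (l.map Prod.fst)).filter
          (fun k => !(g.contains k))).map (fun k => (k, F k)) := by
  induction l generalizing g with
  | nil => simp [PySem.Set.ofList_nil]
  | cons p l ih =>
      simp only [List.foldl_cons, List.map_cons, PySem.Set.ofList_cons]
      by_cases h : g.contains p.1 = true
      · simp only [h, if_true, ih]
        congr 2
        simp only [PySem.Set.discard, List.filter_cons, h, Bool.not_true,
          Bool.false_eq_true, if_false, List.filter_filter]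
        apply List.filter_congr
        intro k hk
        by_cases hkp : k = p.1
        · simp [hkp, h]
        · simp [hkp]
      · rw [Bool.not_eq_true] at h
        simp only [h, Bool.false_eq_true, if_false, ih]
        rw [PySem.Dict.items_insert, if_neg (by simp [h]), List.append_assoc]
        congr 1
        simp only [PySem.Set.discard, List.filter_filter, List.filter_cons, h,
          Bool.not_false, if_true, List.map_cons, List.singleton_append,
          List.cons.injEq, true_and]
        congr 1
        apply List.filter_congr
        intro k hk
        rw [PySem.Dict.contains_insert]
        by_cases hkp : k = p.1
        · simp [hkp]
        · rw [Bool.not_or, Bool.and_comm]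

-- main: the modify-fold's items equal B's staged fold's items
theorem mg_main (ps : List (String × String)) :
    (ps.foldl mgM_step (PySem.Dict.empty : PySem.Dict String (PySem.Set String))).items
      = (ps.foldl (fun g p => if g.contains p.1 then g else g.insert p.1 (mgB_succs ps p.1))
          (PySem.Dict.empty : PySem.Dict String (PySem.Set String))).items := by
  have hkeys : (ps.foldl mgM_step (PySem.Dict.empty : PySem.Dict String (PySem.Set String))).keys
      = PySem.Set.ofList (ps.map Prod.fst) := by
    have := PySem.Dict.keys_foldl_modify_key (l := ps) (key := Prod.fst)
      (d0 := (PySem.Set.empty : PySem.Set String))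
      (f := fun _ p => fun s => PySem.Set.add s p.2)
      (d := (PySem.Dict.empty : PySem.Dict String (PySem.Set String)))
    simpa [mgM_step, PySem.Dict.keys_empty, PySem.Set.ofList] using this
  have hnodup : (ps.foldl mgM_step (PySem.Dict.empty : PySem.Dict String (PySem.Set String))).keys.Nodup := by
    rw [hkeys]; exact PySem.Set.nodup_ofList _
  rw [items_eq_keys_map _ hnodup, hkeys, mgB_fold_items]
  have hempty : (PySem.Dict.empty : PySem.Dict String (PySem.Set String)).items = [] := rfl
  simp only [hempty, PySem.Dict.contains_empty, List.nil_append,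
    Bool.not_false, List.filter_true]
  apply List.map_congr_left
  intro k hk
  rw [mgM_getD]
  simp [mgB_succs, PySem.Dict.getD_empty]

-- ===== VERDICT (by name: the statement is the Claim_ definition above) =====
theorem create_markov_graph_spec : Claim_equal_create_markov_graph := by
  intro s _
  unfold Spec_create_markov_graph create_markov_graph create_markov_graph_alt
  have hchars : (("^".toList ++ s.toList ++ "$".toList).map (fun c => String.mk [c]))
      = "^" :: (s.toList.map (fun c => String.mk [c]) ++ ["$"]) := by
    simp [List.map_append]
    exact ⟨rfl, rfl⟩
  simp only [mgA_fold, hchars, List.tail_cons]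
  exact mg_main _
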